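-- pv_equiv track=rewrite | github.com/Shashank-Reddy-Y/JARVIS-DOMAIN-SPECIFIC-V1 | verifier.py | _score_redundancy
-- ===== SOURCE A (Python) =====
-- from typing import Any, Dict, List, Optional, Sequence
--
-- def _score_redundancy(pipeline: Sequence[Dict[str, Any]]) -> int:
--     seen = set()
--     score = 20
--     for step in pipeline:
--         tool = step.get("tool")
--         if tool in seen and tool not in {"qa_engine", "wikipedia_search"}:
--             score -= 5
--         seen.add(tool)
--     return max(0, min(20, score))
-- ===== SOURCE B (Python) =====
-- def _score_redundancy(pipeline):
--     tools = [step.get("tool") for step in pipeline]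
--     whitelist = {"qa_engine", "wikipedia_search"}
--     penalty = sum(5 * (tools.count(t) - 1) for t in set(tools) if t not in whitelist)
--     return max(0, min(20, 20 - penalty))
-- ===== Notes on version B (the rewrite author's own statement) =====
-- stated objective: simpler
-- what changed: Replaces the per-step seen-set loop with a two-pass frequency formulation: collect the tools, then sum 5*(count-1) over the distinct non-whitelisted tools and clamp once.
import Mathlib
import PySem

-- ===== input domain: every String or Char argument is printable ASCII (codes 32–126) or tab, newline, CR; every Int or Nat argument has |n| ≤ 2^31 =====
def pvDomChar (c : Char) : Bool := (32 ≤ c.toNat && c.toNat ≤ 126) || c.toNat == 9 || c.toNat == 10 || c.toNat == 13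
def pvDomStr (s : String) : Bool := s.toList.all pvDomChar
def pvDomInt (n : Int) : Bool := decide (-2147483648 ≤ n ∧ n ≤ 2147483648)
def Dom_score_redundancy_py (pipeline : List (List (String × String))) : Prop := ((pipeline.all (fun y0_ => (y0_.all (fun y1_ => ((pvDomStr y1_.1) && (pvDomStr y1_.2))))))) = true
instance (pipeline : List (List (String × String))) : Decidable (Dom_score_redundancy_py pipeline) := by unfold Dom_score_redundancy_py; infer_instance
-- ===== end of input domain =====

-- B is a simpler two-pass frequency formulation of A's per-step seen-set loop; return values proved equal on all inputs.

-- ===== PORT A =====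
-- 'tool in {"qa_engine", "wikipedia_search"}' (tool : Option String, from step.get)
def pvWhite (t : Option String) : Bool := t == some "qa_engine" || t == some "wikipedia_search"

def score_redundancy_py (pipeline : List (List (String × String))) : Int :=
  let st := pipeline.foldl
    (fun (p : PySem.Set (Option String) × Int) step =>
      let tool := PySem.Dict.get? (PySem.Dict.mk step) "tool"
      let score := if PySem.Set.contains p.1 tool && !(pvWhite tool) then p.2 - 5 else p.2
      (PySem.Set.add p.1 tool, score))
    (PySem.Set.empty, 20)
  max 0 (min 20 st.2)

-- ===== PORT B =====
def score_redundancy_py_alt (pipeline : List (List (String × String))) : Int :=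
  let tools : List (Option String) := pipeline.map (fun step => PySem.Dict.get? (PySem.Dict.mk step) "tool")
  let penalty : Int :=
    (((PySem.Set.ofList tools).filter (fun t => !(pvWhite t))).map
      (fun t => 5 * ((tools.count t : Int) - 1))).sum
  max 0 (min 20 (20 - penalty))

-- ===== PRECONDITION & SPEC =====
def Spec_score_redundancy_py (pipeline : List (List (String × String))) (out : Int) : Prop := out = score_redundancy_py_alt pipeline
instance (pipeline : List (List (String × String))) (out : Int) : Decidable (Spec_score_redundancy_py pipeline out) := by unfold Spec_score_redundancy_py; infer_instance

-- ===== CLAIM (what is proved, stated in full; the proofs are below) =====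
def Claim_equal_score_redundancy_py : Prop := ∀ (pipeline : List (List (String × String))), Dom_score_redundancy_py pipeline → Spec_score_redundancy_py pipeline (score_redundancy_py pipeline)

-- ===== LEMMAS AND PROOFS =====

-- B's penalty as a function of the tool list
def pvPenalty (ts : List (Option String)) : Int :=
  (((PySem.Set.ofList ts).filter (fun t => !(pvWhite t))).map
    (fun t => 5 * ((ts.count t : Int) - 1))).sum

-- the total A subtracts, as a recursion along A's loop
def pvPenAux (seen : PySem.Set (Option String)) : List (Option String) → Int
  | [] => 0
  | t :: ts => (if PySem.Set.contains seen t && !(pvWhite t) then 5 else 0) + pvPenAux (PySem.Set.add seen t) ts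

lemma pvA_loop (ts : List (Option String)) (seen : PySem.Set (Option String)) (score : Int) :
    ts.foldl
      (fun (p : PySem.Set (Option String) × Int) t =>
        (PySem.Set.add p.1 t, if PySem.Set.contains p.1 t && !(pvWhite t) then p.2 - 5 else p.2))
      (seen, score)
    = (PySem.Set.update seen ts, score - pvPenAux seen ts) := by
  induction ts generalizing seen score with
  | nil => simp [pvPenAux, PySem.Set.update]
  | cons t ts ih =>
    simp only [List.foldl_cons, pvPenAux, PySem.Set.update_cons, ih, Prod.mk.injEq]
    refine ⟨by simp, by split_ifs <;> ring⟩

lemma pvPenAux_append (ts : List (Option String)) (t : Option String) (seen : PySem.Set (Option String)) :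
    pvPenAux seen (ts ++ [t])
    = pvPenAux seen ts + (if PySem.Set.contains (PySem.Set.update seen ts) t && !(pvWhite t) then 5 else 0) := by
  induction ts generalizing seen with
  | nil => simp [pvPenAux, PySem.Set.update]
  | cons u ts ih => simp [pvPenAux, PySem.Set.update_cons, ih]; ring

lemma pvSum_map_update (l : List (Option String)) (f g : Option String → Int) (t : Option String)
    (hnd : l.Nodup) (ht : t ∈ l) (hfg : ∀ x ∈ l, x ≠ t → f x = g x) :
    (l.map f).sum = (l.map g).sum + (f t - g t) := by
  induction l with
  | nil => cases ht
  | cons u l ih =>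
    rcases List.mem_cons.mp ht with h | h
    · subst h
      have : ∀ x ∈ l, f x = g x := fun x hx =>
        hfg x (List.mem_cons_of_mem _ hx) (fun he => (List.nodup_cons.mp hnd).1 (he ▸ hx))
      simp [List.map_congr_left this]
      ring
    · have hu : u ≠ t := fun he => (List.nodup_cons.mp hnd).1 (he ▸ h)
      have := ih (List.nodup_cons.mp hnd).2 h (fun x hx => hfg x (List.mem_cons_of_mem _ hx))
      simp [this, hfg u (List.mem_cons_self) hu]
      ring

lemma pvPenalty_eq (ts : List (Option String)) : pvPenAux PySem.Set.empty ts = pvPenalty ts := by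
  induction ts using List.reverseRecOn with
  | nil => simp [pvPenAux, pvPenalty, PySem.Set.ofList]
  | append_singleton ts t ih =>
    have hup : PySem.Set.update PySem.Set.empty ts = PySem.Set.ofList ts := rfl
    rw [pvPenAux_append, ih, hup]
    have hofl : PySem.Set.ofList (ts ++ [t]) = PySem.Set.add (PySem.Set.ofList ts) t :=
      PySem.Set.ofList_append_singleton ts t
    by_cases hmem : t ∈ ts
    · have hc : PySem.Set.contains (PySem.Set.ofList ts) t = true :=
        (PySem.Set.contains_iff _ _).mpr ((PySem.Set.mem_ofList ts t).mpr hmem)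
      have hadd : PySem.Set.add (PySem.Set.ofList ts) t = PySem.Set.ofList ts :=
        PySem.Set.add_of_mem ((PySem.Set.mem_ofList ts t).mpr hmem)
      by_cases hw : pvWhite t = true
      · -- whitelisted repeat: neither side changes
        simp only [pvPenalty, hofl, hadd, hc, hw, Bool.not_true, Bool.and_false,
          if_neg Bool.false_ne_true]
        have : ∀ x ∈ (PySem.Set.ofList ts).filter (fun t => !(pvWhite t)),
            (fun t' => (5 : Int) * (((ts ++ [t]).count t' : Int) - 1)) x
            = (fun t' => (5 : Int) * (((ts.count t' : Int)) - 1)) x := by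
          intro x hx
          have hxw : pvWhite x = false := by
            have := (List.mem_filter.mp hx).2; simpa using this
          have hxt : x ≠ t := fun he => by rw [he, hw] at hxw; cases hxw
          simp [List.count_append, Ne.symm hxt]
        rw [List.map_congr_left this]
        simp
      · -- non-whitelisted repeat: B's term for t grows by 5, A adds 5
        have hwf : pvWhite t = false := by simpa using hw
        have htl : t ∈ (PySem.Set.ofList ts).filter (fun t => !(pvWhite t)) := by
          simp [List.mem_filter, PySem.Set.mem_ofList, hmem, hwf]
        have hnd : ((PySem.Set.ofList ts).filter (fun t => !(pvWhite t))).Nodup :=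
          (PySem.Set.nodup_ofList ts).filter _
        simp only [pvPenalty, hofl, hadd, hc, hwf]
        rw [pvSum_map_update _ (fun t' => (5 : Int) * (((ts ++ [t]).count t' : Int) - 1))
              (fun t' => (5 : Int) * ((ts.count t' : Int) - 1)) t hnd htl
              (by intro x hx hxt; simp [List.count_append, Ne.symm hxt])]
        have hcnt : (((ts ++ [t]).count t : Int)) = (ts.count t : Int) + 1 := by
          simp [List.count_append]
        simp only [hcnt]
        simp
        omega
    · -- first occurrence: B gains a 5*(1-1)=0 term (or none), A adds 0
      have hc : PySem.Set.contains (PySem.Set.ofList ts) t = false := by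
        have : t ∉ PySem.Set.ofList ts := fun h => hmem ((PySem.Set.mem_ofList ts t).mp h)
        simpa [PySem.Set.contains_iff] using this
      have hadd : PySem.Set.add (PySem.Set.ofList ts) t = PySem.Set.ofList ts ++ [t] :=
        PySem.Set.add_of_not_mem (fun h => hmem ((PySem.Set.mem_ofList ts t).mp h))
      have hcounts : ∀ x ∈ (PySem.Set.ofList ts).filter (fun t => !(pvWhite t)),
          (fun t' => (5 : Int) * (((ts ++ [t]).count t' : Int) - 1)) x
          = (fun t' => (5 : Int) * ((ts.count t' : Int) - 1)) x := by
        intro x hx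
        have hxm : x ∈ ts := (PySem.Set.mem_ofList ts x).mp (List.mem_filter.mp hx).1
        have hxt : x ≠ t := fun he => hmem (he ▸ hxm)
        simp [List.count_append, Ne.symm hxt]
      have hct : (((ts ++ [t]).count t : Int)) = 1 := by
        simp [List.count_append, List.count_eq_zero.mpr hmem]
      simp only [pvPenalty, hofl, hadd, hc, Bool.false_and, if_neg Bool.false_ne_true,
        List.filter_append, List.filter_cons, List.filter_nil]
      by_cases hw : pvWhite t = true
      · simp only [hw, Bool.not_true, if_neg Bool.false_ne_true, List.append_nil]
        rw [List.map_congr_left hcounts]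
        simp
      · have hwf : pvWhite t = false := by simpa using hw
        simp only [hwf, Bool.not_false]
        rw [List.map_append, List.sum_append, List.map_congr_left hcounts]
        simp [List.count_eq_zero.mpr hmem]

lemma pvFoldl_map (pipeline : List (List (String × String))) (init : PySem.Set (Option String) × Int) :
    pipeline.foldl
      (fun (p : PySem.Set (Option String) × Int) step =>
        let tool := PySem.Dict.get? (PySem.Dict.mk step) "tool"
        let score := if PySem.Set.contains p.1 tool && !(pvWhite tool) then p.2 - 5 else p.2
        (PySem.Set.add p.1 tool, score)) init
    = (pipeline.map (fun step => PySem.Dict.get? (PySem.Dict.mk step) "tool")).foldl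
      (fun (p : PySem.Set (Option String) × Int) t =>
        (PySem.Set.add p.1 t, if PySem.Set.contains p.1 t && !(pvWhite t) then p.2 - 5 else p.2)) init := by
  rw [List.foldl_map]

-- ===== VERDICT (by name: the statement is the Claim_ definition above) =====
theorem score_redundancy_py_spec : Claim_equal_score_redundancy_py := by
  intro pipeline _
  unfold Spec_score_redundancy_py score_redundancy_py score_redundancy_py_alt
  rw [pvFoldl_map, pvA_loop]
  simp only [pvPenalty_eq]
  rfl
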